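-- pv_equiv track=rewrite | github.com/Giangattt123/KTGT-Lab | steg-sequence-number/sender/encode.py | encode_message_to_sequences
-- ===== SOURCE A (Python) =====
-- KEY = 0x42  # Khóa XOR
--
-- def encode_message_to_sequences(message):
--     message_bytes = message.encode('ascii')
--     # XOR từng byte
--     encrypted_bytes = bytes([b ^ KEY for b in message_bytes])
--     sequences = []
--
--     # Chia thành khối 4 byte
--     for i in range(0, len(encrypted_bytes), 4):
--         chunk = encrypted_bytes[i:i+4]
--         while len(chunk) < 4:
--             chunk += b'\x00'
--         seq = int.from_bytes(chunk, 'big')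
--         sequences.append(seq)
--
--     return sequences
-- ===== SOURCE B (Python) =====
-- KEY = 0x42  # XOR key
--
-- def encode_message_to_sequences(message):
--     # Single pass over the bytes with an integer accumulator instead of
--     # slicing chunk-by-chunk and padding in an inner loop.
--     data = message.encode('ascii')
--     sequences = []
--     acc = 0
--     count = 0
--     for b in data:
--         acc = acc * 256 + (b ^ KEY)
--         count += 1
--         if count == 4:
--             sequences.append(acc)
--             acc = 0
--             count = 0
--     if count > 0:
--         sequences.append(acc * 256 ** (4 - count))
--     return sequences
-- ===== Notes on version B (the rewrite author's own statement) =====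
-- stated objective: simpler
-- what changed: Replaced the chunk-index loop with slicing, an inner zero-padding while-loop and int.from_bytes by a single pass over the bytes maintaining an integer accumulator and a count, left-shifting the final partial chunk.
import Mathlib
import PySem

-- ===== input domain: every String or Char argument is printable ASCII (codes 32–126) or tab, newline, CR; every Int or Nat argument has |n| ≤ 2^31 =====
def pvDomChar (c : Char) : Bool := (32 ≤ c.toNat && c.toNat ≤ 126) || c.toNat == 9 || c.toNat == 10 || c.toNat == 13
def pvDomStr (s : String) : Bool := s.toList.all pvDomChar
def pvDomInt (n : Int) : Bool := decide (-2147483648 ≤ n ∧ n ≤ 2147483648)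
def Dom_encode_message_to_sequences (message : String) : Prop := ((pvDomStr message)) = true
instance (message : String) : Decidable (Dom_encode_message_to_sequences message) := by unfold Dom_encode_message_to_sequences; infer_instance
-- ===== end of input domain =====

-- B replaces A's chunk-index loop (slice + inner padding while-loop + int.from_bytes)
-- by one pass over the bytes with an integer accumulator and a count: simpler.
-- Dom restricts inputs to ASCII, so message.encode('ascii') never raises: no Pre_.

-- ===== PORT A =====
-- while len(chunk) < 4: chunk += b'\x00'
def pvPadTo4 (chunk : List Nat) : List Nat :=
  if chunk.length < 4 then pvPadTo4 (chunk ++ [0]) else chunk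
termination_by 4 - chunk.length
decreasing_by simp; omega

-- int.from_bytes(chunk, 'big')  (big-endian value of the byte list)
def pvFromBytesBig (chunk : List Nat) : Nat :=
  chunk.foldl (fun a b => a * 256 + b) 0

def encode_message_to_sequences (message : String) : List Int :=
  let message_bytes := message.toList.map (fun c => c.toNat)
  let encrypted_bytes := message_bytes.map (fun b => b ^^^ 66)
  (PySem.List.pyRange 0 (encrypted_bytes.length : Int) 4).foldl
    (fun sequences i =>
      sequences ++
        [Int.ofNat (pvFromBytesBig (pvPadTo4
          (PySem.List.slice encrypted_bytes (some i) (some (i + 4)))))]) []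

-- ===== PORT B =====
def encode_message_to_sequences_alt (message : String) : List Int :=
  let data := message.toList.map (fun c => c.toNat)
  let st := data.foldl
    (fun (st : List Int × Nat × Nat) b =>
      let acc := st.2.1 * 256 + (b ^^^ 66)
      let count := st.2.2 + 1
      if count == 4 then (st.1 ++ [(acc : Int)], 0, 0) else (st.1, acc, count))
    ([], 0, 0)
  if st.2.2 > 0 then st.1 ++ [((st.2.1 * 256 ^ (4 - st.2.2) : Nat) : Int)] else st.1

-- ===== PRECONDITION & SPEC =====
def Spec_encode_message_to_sequences (message : String) (out : List Int) : Prop := out = encode_message_to_sequences_alt message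
instance (message : String) (out : List Int) : Decidable (Spec_encode_message_to_sequences message out) := by unfold Spec_encode_message_to_sequences; infer_instance

-- ===== CLAIM (what is proved, stated in full; the proofs are below) =====
def Claim_equal_encode_message_to_sequences : Prop := ∀ (message : String), Dom_encode_message_to_sequences message → Spec_encode_message_to_sequences message (encode_message_to_sequences message)

-- ===== LEMMAS AND PROOFS =====

-- common target: the chunk list both loops compute
def pvChunks (l : List Nat) : List Int :=
  if hl : l = [] then []
  else Int.ofNat (pvFromBytesBig (pvPadTo4 (l.take 4))) :: pvChunks (l.drop 4)
termination_by l.length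
decreasing_by cases l with
  | nil => exact absurd rfl hl
  | cons a t => simp

lemma pvChunks_nil : pvChunks [] = [] := by simp [pvChunks]

lemma pvChunks_cons (a : Nat) (t : List Nat) :
    pvChunks (a :: t) =
      Int.ofNat (pvFromBytesBig (pvPadTo4 ((a :: t).take 4))) :: pvChunks (t.drop 3) := by
  rw [pvChunks]; simp

lemma pvRange4_cons (a b : Int) (h : a < b) :
    PySem.List.pyRange a b 4 = a :: PySem.List.pyRange (a + 4) b 4 := by
  rw [PySem.List.pyRange_of_pos a b (by norm_num),
      PySem.List.pyRange_of_pos (a + 4) b (by norm_num)]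
  have h1 : ((b - a + 4 - 1) / 4).toNat = ((b - (a + 4) + 4 - 1) / 4).toNat + 1 := by
    omega
  rw [if_pos h, h1]
  by_cases h2 : a + 4 < b
  · rw [if_pos h2, List.range_succ_eq_map]
    simp [List.map_map, Function.comp]
    intro k _
    ring
  · rw [if_neg h2]
    have : ((b - (a + 4) + 4 - 1) / 4).toNat = 0 := by omega
    rw [this]
    simp

lemma pvRange4_nil (a b : Int) (h : b ≤ a) : PySem.List.pyRange a b 4 = [] := by
  rw [PySem.List.pyRange_of_pos a b (by norm_num), if_neg (by omega)]
  simp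

lemma loopA (eb : List Nat) : ∀ (n j : Nat), eb.length - j ≤ n → ∀ (acc : List Int),
    (PySem.List.pyRange (j : Int) (eb.length : Int) 4).foldl
      (fun sequences i =>
        sequences ++
          [Int.ofNat (pvFromBytesBig (pvPadTo4
            (PySem.List.slice eb (some i) (some (i + 4)))))]) acc
      = acc ++ pvChunks (eb.drop j) := by
  intro n
  induction n with
  | zero =>
    intro j hj acc
    have hge : eb.length ≤ j := by omega
    rw [pvRange4_nil _ _ (by exact_mod_cast hge)]
    rw [List.drop_eq_nil_of_le hge, pvChunks_nil]
    simp
  | succ n ih =>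
    intro j hj acc
    by_cases hlt : j < eb.length
    · rw [pvRange4_cons _ _ (by exact_mod_cast hlt)]
      rw [List.foldl_cons]
      have hcast : (j : Int) + 4 = ((j + 4 : Nat) : Int) := by push_cast; ring
      rw [hcast, ih (j + 4) (by omega)]
      have hslice : PySem.List.slice eb (some (j : Int)) (some ((j + 4 : Nat) : Int)) =
          (eb.drop j).take 4 := by
        have := PySem.List.slice_natCast_add eb j 4
        simpa using this
      rw [hslice]
      have hne : eb.drop j ≠ [] := by
        intro h; have := List.drop_eq_nil_iff.mp h; omega
      conv_rhs => rw [pvChunks]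
      rw [dif_neg hne]
      rw [List.drop_drop]
      simp [List.append_assoc]
    · have hge : eb.length ≤ j := by omega
      rw [pvRange4_nil _ _ (by exact_mod_cast hge)]
      rw [List.drop_eq_nil_of_le hge, pvChunks_nil]
      simp

def pvStepB : (List Int × Nat × Nat) → Nat → (List Int × Nat × Nat) :=
  fun st x =>
    let acc := st.2.1 * 256 + x
    let count := st.2.2 + 1
    if count == 4 then (st.1 ++ [(acc : Int)], 0, 0) else (st.1, acc, count)

def pvFinish (st : List Int × Nat × Nat) : List Int :=
  if st.2.2 > 0 then st.1 ++ [((st.2.1 * 256 ^ (4 - st.2.2) : Nat) : Int)] else st.1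

lemma loopB : ∀ (n : Nat) (l : List Nat), l.length ≤ n → ∀ (out : List Int),
    pvFinish (l.foldl pvStepB (out, 0, 0)) = out ++ pvChunks l := by
  intro n
  induction n with
  | zero =>
    intro l hl out
    have : l = [] := List.length_eq_zero_iff.mp (by omega)
    subst this
    simp [pvFinish, pvChunks_nil]
  | succ n ih =>
    intro l hl out
    match l with
    | [] => simp [pvFinish, pvChunks_nil]
    | [x] =>
      simp [List.foldl, pvStepB, pvFinish, pvChunks_cons, pvChunks_nil, pvPadTo4, pvFromBytesBig]
      ring_nf
    | [x, y] =>
      simp [List.foldl, pvStepB, pvFinish, pvChunks_cons, pvChunks_nil, pvPadTo4, pvFromBytesBig]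
      ring
    | [x, y, z] =>
      simp [List.foldl, pvStepB, pvFinish, pvChunks_cons, pvChunks_nil, pvPadTo4, pvFromBytesBig]
    | x :: y :: z :: w :: rest =>
      have h4 : (x :: y :: z :: w :: rest).foldl pvStepB (out, 0, 0) =
          rest.foldl pvStepB
            (out ++ [((((((0 * 256 + x) * 256 + y) * 256 + z) * 256 + w : Nat)) : Int)], 0, 0) := by
        simp [List.foldl, pvStepB]
      rw [h4]
      have hr : rest.length ≤ n := by simp at hl; omega
      rw [ih rest hr, pvChunks_cons]
      simp [pvPadTo4, pvFromBytesBig, List.append_assoc]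

-- ===== VERDICT (by name: the statement is the Claim_ definition above) =====
theorem encode_message_to_sequences_spec : Claim_equal_encode_message_to_sequences := by
  intro message _
  unfold Spec_encode_message_to_sequences
  have hAeq : encode_message_to_sequences message =
      pvChunks (message.toList.map (fun c => c.toNat ^^^ 66)) := by
    unfold encode_message_to_sequences
    simp only [List.map_map, Function.comp_def]
    have hA := loopA (message.toList.map (fun c => c.toNat ^^^ 66))
      (message.toList.map (fun c => c.toNat ^^^ 66)).length 0 (by omega) []
    simpa using hA
  have hBeq : encode_message_to_sequences_alt message =
      pvFinish ((message.toList.map (fun c => c.toNat ^^^ 66)).foldl pvStepB ([], 0, 0)) := by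
    unfold encode_message_to_sequences_alt pvFinish
    simp only [List.foldl_map, pvStepB]
  have hB := loopB (message.toList.map (fun c => c.toNat ^^^ 66)).length
    (message.toList.map (fun c => c.toNat ^^^ 66)) (by omega) []
  rw [hAeq, hBeq, hB]
  simp
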